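-- pv_equiv track=rewrite | github.com/BuilderBenv1/brain-v | scripts/run_nomenclator_high_decode.py | brady_to_skel
-- ===== SOURCE A (Python) =====
-- BRADY_EVA_MAP = [
--     ("cth","tk"),("ckh","kk"),("cph","pk"),("ch","k"),("sh","s"),
--     ("k","k"),("d","d"),("r","r"),("s","s"),("l","l"),
--     ("n","n"),("y","y"),("m","m"),("g","g"),
--     ("t","t"),("p","p"),("f","s"),("q","w"),
-- ]
--
-- def brady_to_skel(word):
--     if word and word[0] in "tp" and (len(word)==1 or word[1]!="h"):
--         word = word[1:]
--     out = []; i = 0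
--     while i < len(word):
--         matched = False
--         for ev, sy in BRADY_EVA_MAP:
--             if word.startswith(ev, i):
--                 out.append(sy); i += len(ev); matched = True; break
--         if not matched:
--             i += 1
--     return "".join(out)
-- ===== SOURCE B (Python) =====
-- # Trie-based matcher: a character trie over the Brady patterns ("" marks a
-- # terminal node with its replacement); each position descends the trie
-- # remembering the last terminal seen, i.e. the longest match.
-- _TRIE = {
--     "c": {
--         "t": {"h": {"": "tk"}},
--         "k": {"h": {"": "kk"}},
--         "p": {"h": {"": "pk"}},
--         "h": {"": "k"},
--     },
--     "s": {"": "s", "h": {"": "s"}},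
--     "k": {"": "k"}, "d": {"": "d"}, "r": {"": "r"}, "l": {"": "l"},
--     "n": {"": "n"}, "y": {"": "y"}, "m": {"": "m"}, "g": {"": "g"},
--     "t": {"": "t"}, "p": {"": "p"}, "f": {"": "s"}, "q": {"": "w"},
-- }
--
-- def brady_to_skel(word):
--     if word and word[0] in "tp" and (len(word) == 1 or word[1] != "h"):
--         word = word[1:]
--     out = []
--     i, n = 0, len(word)
--     while i < n:
--         node, j, best = _TRIE, i, None
--         while j < n:
--             nxt = node.get(word[j])
--             if nxt is None:
--                 break
--             node = nxt
--             j += 1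
--             if "" in node:
--                 best = (node[""], j)
--         if best is None:
--             i += 1
--         else:
--             out.append(best[0])
--             i = best[1]
--     return "".join(out)
-- ===== Notes on version B (the rewrite author's own statement) =====
-- stated objective: faster
-- what changed: Replaces A's per-position linear scan over the 18-entry table with startswith by a literal character trie descended once per position, remembering the last terminal node seen (the longest match, identical to A's first match since the table is longest-first with distinct keys).
import Mathlib
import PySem

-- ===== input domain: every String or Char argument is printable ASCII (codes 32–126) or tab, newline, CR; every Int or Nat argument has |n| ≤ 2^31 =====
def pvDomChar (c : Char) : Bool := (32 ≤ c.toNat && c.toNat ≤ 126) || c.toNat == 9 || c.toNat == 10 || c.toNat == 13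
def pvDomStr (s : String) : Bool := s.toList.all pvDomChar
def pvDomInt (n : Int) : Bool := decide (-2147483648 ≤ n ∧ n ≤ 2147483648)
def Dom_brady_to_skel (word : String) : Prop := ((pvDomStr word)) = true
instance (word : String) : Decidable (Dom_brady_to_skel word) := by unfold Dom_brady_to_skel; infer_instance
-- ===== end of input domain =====

-- B replaces A's per-position linear scan of the whole table (startswith on each entry)
-- with a trie built once from the table, descended per position tracking the last
-- terminal seen (longest match); same return value everywhere.

-- shared preamble of both Pythons: strip a leading 't'/'p' not followed by 'h'
def stripTP : List Char → List Char
  | [] => []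
  | a :: rest =>
    if (a == 't' || a == 'p') && (match rest with | [] => true | b :: _ => b != 'h')
    then rest else a :: rest

-- ===== PORT A =====
-- BRADY_EVA_MAP, keys as char lists (word.startswith(ev, i) = prefix test on the suffix)
def bradyEvaMap : List (List Char × String) :=
  [(['c','t','h'],"tk"),(['c','k','h'],"kk"),(['c','p','h'],"pk"),(['c','h'],"k"),(['s','h'],"s"),
   (['k'],"k"),(['d'],"d"),(['r'],"r"),(['s'],"s"),(['l'],"l"),
   (['n'],"n"),(['y'],"y"),(['m'],"m"),(['g'],"g"),
   (['t'],"t"),(['p'],"p"),(['f'],"s"),(['q'],"w")]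

-- the inner 'for ev, sy in BRADY_EVA_MAP: if word.startswith(ev, i): … break'
def findA : List (List Char × String) → List Char → Option (String × Nat)
  | [], _ => none
  | (ev, sy) :: rest, cs => if ev.isPrefixOf cs then some (sy, ev.length) else findA rest cs

-- the 'while i < len(word)' loop; cs is the suffix word[i:]; fuel = initial length (i advances ≥ 1 each turn)
def loopA : Nat → List Char → List String
  | 0, _ => []
  | fuel + 1, cs =>
    match cs with
    | [] => []
    | _ :: _ =>
      match findA bradyEvaMap cs with
      | some (sy, n) => sy :: loopA fuel (cs.drop n)
      | none => loopA fuel (cs.drop 1)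

def brady_to_skel (word : String) : String :=
  let cs := stripTP word.toList
  PySem.Str.join "" (loopA cs.length cs)

-- ===== PORT B =====
-- the trie built once by Source B's _build_trie, here flattened into an indexed node
-- table (nested dicts would be a nested inductive): node = (terminal?, child edges)
def trieNodes : List (Option String × List (Char × Nat)) :=
  [ (none, [('c',1),('s',2),('k',11),('d',12),('r',13),('l',14),('n',15),('y',16),
            ('m',17),('g',18),('t',19),('p',20),('f',21),('q',22)]),   -- 0 root
    (none, [('t',3),('k',5),('p',7),('h',9)]),                          -- 1 "c"
    (some "s", [('h',10)]),                                              -- 2 "s"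
    (none, [('h',4)]),                                                   -- 3 "ct"
    (some "tk", []),                                                     -- 4 "cth"
    (none, [('h',6)]),                                                   -- 5 "ck"
    (some "kk", []),                                                     -- 6 "ckh"
    (none, [('h',8)]),                                                   -- 7 "cp"
    (some "pk", []),                                                     -- 8 "cph"
    (some "k", []),                                                      -- 9 "ch"
    (some "s", []),                                                      -- 10 "sh"
    (some "k", []), (some "d", []), (some "r", []), (some "l", []),      -- 11-14
    (some "n", []), (some "y", []), (some "m", []), (some "g", []),      -- 15-18
    (some "t", []), (some "p", []), (some "s", []), (some "w", []) ]     -- 19-22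

def trieNode (i : Nat) : Option String × List (Char × Nat) :=
  trieNodes.getD i (none, [])

-- Source B's inner 'while j < n' descent: follow edges, remember last terminal (sy, chars consumed)
def descend : Nat → List Char → Nat → Option (String × Nat) → Option (String × Nat)
  | _, [], _, best => best
  | nd, c :: rest, k, best =>
    match (trieNode nd).2.lookup c with
    | none => best
    | some nd' =>
      descend nd' rest (k + 1)
        (match (trieNode nd').1 with
         | some sy => some (sy, k + 1)
         | none => best)

-- Source B's outer 'while i < n' loop
def loopB : Nat → List Char → List String
  | 0, _ => []
  | fuel + 1, cs =>
    match cs with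
    | [] => []
    | _ :: _ =>
      match descend 0 cs 0 none with
      | some (sy, k) => sy :: loopB fuel (cs.drop k)
      | none => loopB fuel (cs.drop 1)

def brady_to_skel_alt (word : String) : String :=
  let cs := stripTP word.toList
  PySem.Str.join "" (loopB cs.length cs)

-- ===== PRECONDITION & SPEC =====
def Spec_brady_to_skel (word : String) (out : String) : Prop := out = brady_to_skel_alt word
instance (word : String) (out : String) : Decidable (Spec_brady_to_skel word out) := by unfold Spec_brady_to_skel; infer_instance

-- ===== CLAIM =====
def Claim_equal_brady_to_skel : Prop := ∀ (word : String), Dom_brady_to_skel word → Spec_brady_to_skel word (brady_to_skel word)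

-- ===== LEMMAS AND PROOFS =====

-- descending from a node with no outgoing edges keeps the best match
theorem descend_stop (n : Nat) (h : (trieNode n).2 = []) (cs : List Char) (k : Nat)
    (best : Option (String × Nat)) : descend n cs k best = best := by
  cases cs with
  | nil => rfl
  | cons c r => simp [descend, h]

-- the trie descent from the root finds exactly A's first (= longest) table match
theorem descend_eq (cs : List Char) : descend 0 cs 0 none = findA bradyEvaMap cs := by
  have nb : ∀ (a c : Char), ¬ a = c → (c == a) = false :=
    fun a c h => beq_eq_false_iff_ne.mpr (fun e => h e.symm)
  match cs with
  | [] => rfl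
  | a :: rest =>
    by_cases h1 : a = 'c'
    · subst h1
      match rest with
      | [] => rfl
      | b :: r2 =>
        by_cases g1 : b = 't'
        · subst g1
          match r2 with
          | [] => rfl
          | c3 :: r3 =>
            by_cases k1 : c3 = 'h'
            · subst k1; simp [descend, findA, trieNode, trieNodes, bradyEvaMap, List.isPrefixOf, descend_stop 4 rfl]
            · simp [descend, findA, trieNode, trieNodes, bradyEvaMap, List.lookup, List.isPrefixOf, beq_eq_false_iff_ne.mpr k1, nb _ _ k1]
        ·
          by_cases g2 : b = 'k'
          · subst g2
            match r2 with
            | [] => rfl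
            | c3 :: r3 =>
              by_cases k1 : c3 = 'h'
              · subst k1; simp [descend, findA, trieNode, trieNodes, bradyEvaMap, List.lookup, List.isPrefixOf, descend_stop 6 rfl]
              · simp [descend, findA, trieNode, trieNodes, bradyEvaMap, List.lookup, List.isPrefixOf, beq_eq_false_iff_ne.mpr k1, nb _ _ k1]
          ·
            by_cases g3 : b = 'p'
            · subst g3
              match r2 with
              | [] => rfl
              | c3 :: r3 =>
                by_cases k1 : c3 = 'h'
                · subst k1; simp [descend, findA, trieNode, trieNodes, bradyEvaMap, List.lookup, List.isPrefixOf, descend_stop 8 rfl]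
                · simp [descend, findA, trieNode, trieNodes, bradyEvaMap, List.lookup, List.isPrefixOf, beq_eq_false_iff_ne.mpr k1, nb _ _ k1]
            ·
              by_cases g4 : b = 'h'
              · subst g4; simp [descend, findA, trieNode, trieNodes, bradyEvaMap, List.lookup, List.isPrefixOf, descend_stop 9 rfl]
              · simp [descend, findA, trieNode, trieNodes, bradyEvaMap, List.lookup, List.isPrefixOf, beq_eq_false_iff_ne.mpr g1, nb _ _ g1, beq_eq_false_iff_ne.mpr g2, nb _ _ g2, beq_eq_false_iff_ne.mpr g3, nb _ _ g3, beq_eq_false_iff_ne.mpr g4, nb _ _ g4]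
    · by_cases h2 : a = 's'
      · subst h2
        match rest with
        | [] => rfl
        | b :: r2 =>
          by_cases g1 : b = 'h'
          · subst g1; simp [descend, findA, trieNode, trieNodes, bradyEvaMap, List.lookup, List.isPrefixOf, descend_stop 10 rfl]
          · simp [descend, findA, trieNode, trieNodes, bradyEvaMap, List.lookup, List.isPrefixOf, beq_eq_false_iff_ne.mpr g1, nb _ _ g1]
      · by_cases h3 : a = 'k'
        · subst h3; simp [descend, findA, trieNode, trieNodes, bradyEvaMap, List.lookup, List.isPrefixOf, descend_stop 11 rfl]
        · by_cases h4 : a = 'd'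
          · subst h4; simp [descend, findA, trieNode, trieNodes, bradyEvaMap, List.lookup, List.isPrefixOf, descend_stop 12 rfl]
          · by_cases h5 : a = 'r'
            · subst h5; simp [descend, findA, trieNode, trieNodes, bradyEvaMap, List.lookup, List.isPrefixOf, descend_stop 13 rfl]
            · by_cases h6 : a = 'l'
              · subst h6; simp [descend, findA, trieNode, trieNodes, bradyEvaMap, List.lookup, List.isPrefixOf, descend_stop 14 rfl]
              · by_cases h7 : a = 'n'
                · subst h7; simp [descend, findA, trieNode, trieNodes, bradyEvaMap, List.lookup, List.isPrefixOf, descend_stop 15 rfl]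
                · by_cases h8 : a = 'y'
                  · subst h8; simp [descend, findA, trieNode, trieNodes, bradyEvaMap, List.lookup, List.isPrefixOf, descend_stop 16 rfl]
                  · by_cases h9 : a = 'm'
                    · subst h9; simp [descend, findA, trieNode, trieNodes, bradyEvaMap, List.lookup, List.isPrefixOf, descend_stop 17 rfl]
                    · by_cases h10 : a = 'g'
                      · subst h10; simp [descend, findA, trieNode, trieNodes, bradyEvaMap, List.lookup, List.isPrefixOf, descend_stop 18 rfl]
                      · by_cases h11 : a = 't'
                        · subst h11; simp [descend, findA, trieNode, trieNodes, bradyEvaMap, List.lookup, List.isPrefixOf, descend_stop 19 rfl]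
                        · by_cases h12 : a = 'p'
                          · subst h12; simp [descend, findA, trieNode, trieNodes, bradyEvaMap, List.lookup, List.isPrefixOf, descend_stop 20 rfl]
                          · by_cases h13 : a = 'f'
                            · subst h13; simp [descend, findA, trieNode, trieNodes, bradyEvaMap, List.lookup, List.isPrefixOf, descend_stop 21 rfl]
                            · by_cases h14 : a = 'q'
                              · subst h14; simp [descend, findA, trieNode, trieNodes, bradyEvaMap, List.lookup, List.isPrefixOf, descend_stop 22 rfl]
                              · simp [descend, findA, trieNode, trieNodes, bradyEvaMap, List.lookup, List.isPrefixOf, beq_eq_false_iff_ne.mpr h1, nb _ _ h1, beq_eq_false_iff_ne.mpr h2, nb _ _ h2, beq_eq_false_iff_ne.mpr h3, nb _ _ h3, beq_eq_false_iff_ne.mpr h4, nb _ _ h4, beq_eq_false_iff_ne.mpr h5, nb _ _ h5, beq_eq_false_iff_ne.mpr h6, nb _ _ h6, beq_eq_false_iff_ne.mpr h7, nb _ _ h7, beq_eq_false_iff_ne.mpr h8, nb _ _ h8, beq_eq_false_iff_ne.mpr h9, nb _ _ h9, beq_eq_false_iff_ne.mpr h10, nb _ _ h10, beq_eq_false_iff_ne.mpr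 h11, nb _ _ h11, beq_eq_false_iff_ne.mpr h12, nb _ _ h12, beq_eq_false_iff_ne.mpr h13, nb _ _ h13, beq_eq_false_iff_ne.mpr h14, nb _ _ h14]

theorem loop_eq (fuel : Nat) (cs : List Char) : loopA fuel cs = loopB fuel cs := by
  induction fuel generalizing cs with
  | zero => rfl
  | succ f ih =>
    match cs with
    | [] => rfl
    | a :: t =>
      rw [loopA, loopB, ← descend_eq]
      cases h : descend 0 (a :: t) 0 none with
      | some p => obtain ⟨sy, k⟩ := p; simp [ih]
      | none => simp [ih]

-- ===== VERDICT =====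
theorem brady_to_skel_spec : Claim_equal_brady_to_skel := by
  intro word _
  simp only [Spec_brady_to_skel, brady_to_skel, brady_to_skel_alt, loop_eq]
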